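-- pv_equiv track=rewrite | github.com/xurator/python3-rsk-mt | src/rsk_mt/jsonschema/schema.py | key_path_at_schema
-- ===== SOURCE A (Python) =====
-- def key_path_at_schema(key_path):
--     """Return True if `key_path` addresses a schema, else False.
--
--     Return False if `key_path` addresses a plain object.
--     """
--     if key_path == ('definitions',):
--         return False
--     count = 0
--     for token in reversed(key_path):
--         if token in ('properties', 'patternProperties', 'dependencies'):
--             count += 1
--         else:
--             break
--     if count % 2:
--         return False
--     return True
-- ===== SOURCE B (Python) =====
-- _SCHEMA_KEYWORDS = frozenset(('properties', 'patternProperties', 'dependencies'))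
--
-- def key_path_at_schema(key_path):
--     """Return True if `key_path` addresses a schema, else False.
--
--     Return False if `key_path` addresses a plain object.
--     """
--     if key_path == ('definitions',):
--         return False
--     run = 0
--     for token in key_path:
--         run = run + 1 if token in _SCHEMA_KEYWORDS else 0
--     return run % 2 == 0
-- ===== Notes on version B (the rewrite author's own statement) =====
-- stated objective: alternative
-- what changed: Replaces the reversed-iteration loop with early break by a single forward pass maintaining a run counter that resets on non-keyword tokens (trailing-run length computed forward), then returns the parity test directly instead of an if/return pair.
import Mathlib
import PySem

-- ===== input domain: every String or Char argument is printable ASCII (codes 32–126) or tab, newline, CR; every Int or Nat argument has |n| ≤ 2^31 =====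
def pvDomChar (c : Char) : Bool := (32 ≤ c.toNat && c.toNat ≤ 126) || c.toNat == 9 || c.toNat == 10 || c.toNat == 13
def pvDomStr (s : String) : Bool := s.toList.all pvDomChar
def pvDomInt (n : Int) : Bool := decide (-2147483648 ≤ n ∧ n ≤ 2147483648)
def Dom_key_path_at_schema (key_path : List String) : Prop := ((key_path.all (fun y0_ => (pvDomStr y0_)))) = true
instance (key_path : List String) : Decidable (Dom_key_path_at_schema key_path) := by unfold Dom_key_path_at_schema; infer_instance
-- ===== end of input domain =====

-- B: forward pass with a reset-on-mismatch run counter instead of A's reversed loop with early break; return-value equivalence proved.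
-- ===== PORT A =====
-- reversed loop with break: structural recursion over key_path.reverse, stopping at the first non-keyword
def pvCountA : List String → Nat
  | [] => 0
  | t :: rest =>
      if t = "properties" ∨ t = "patternProperties" ∨ t = "dependencies" then
        pvCountA rest + 1
      else 0

def key_path_at_schema (key_path : List String) : Bool :=
  if key_path = ["definitions"] then false
  else
    let count := pvCountA key_path.reverse
    if count % 2 ≠ 0 then false else true

-- ===== PORT B =====
def key_path_at_schema_alt (key_path : List String) : Bool :=
  if key_path = ["definitions"] then false
  else
    let run := key_path.foldl
      (fun run token =>
        if token = "properties" ∨ token = "patternProperties" ∨ token = "dependencies" then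
          run + 1
        else 0) 0
    run % 2 == 0

-- ===== PRECONDITION & SPEC =====
def Spec_key_path_at_schema (key_path : List String) (out : Bool) : Prop := out = key_path_at_schema_alt key_path
instance (key_path : List String) (out : Bool) : Decidable (Spec_key_path_at_schema key_path out) := by unfold Spec_key_path_at_schema; infer_instance

-- ===== CLAIM (what is proved, stated in full; the proofs are below) =====
def Claim_equal_key_path_at_schema : Prop := ∀ (key_path : List String), Dom_key_path_at_schema key_path → Spec_key_path_at_schema key_path (key_path_at_schema key_path)

-- ===== LEMMAS AND PROOFS =====

theorem pvFoldl_reset (xs : List String) :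
    xs.foldl
      (fun run token =>
        if token = "properties" ∨ token = "patternProperties" ∨ token = "dependencies" then
          run + 1
        else 0) 0
    = pvCountA xs.reverse := by
  induction xs using List.reverseRecOn with
  | nil => simp [pvCountA]
  | append_singleton ys t ih =>
      simp only [List.foldl_append, List.foldl_cons, List.foldl_nil,
        List.reverse_append, List.reverse_cons, List.reverse_nil,
        List.nil_append, List.cons_append, pvCountA]
      split_ifs with h
      · rw [ih]
      · rfl

-- ===== VERDICT (by name: the statement is the Claim_ definition above) =====
theorem key_path_at_schema_spec : Claim_equal_key_path_at_schema := by
  intro key_path _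
  unfold Spec_key_path_at_schema key_path_at_schema key_path_at_schema_alt
  by_cases h : key_path = ["definitions"]
  · simp [h]
  · simp only [h, if_false]
    rw [pvFoldl_reset]
    rcases Nat.even_or_odd (pvCountA key_path.reverse) with he | ho
    · simp [Nat.even_iff.mp he]
    · simp [Nat.odd_iff.mp ho]
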